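-- pv_equiv track=rewrite | github.com/Bh3ky/DSA | searching_algorithms/test_partition.py | is_valid_partition
-- ===== SOURCE A (Python) =====
-- def is_valid_partition(arr, pivot):
--     """
--     Helper function:
--     checks that array is partitioned as:
--     < pivot | == pivot | > pivot
--     """
--     seen_equal = False
--     seen_greater = False
--
--     for x in arr:
--         if x < pivot:
--             if seen_equal or seen_greater:
--                 return False
--         elif x == pivot:
--             seen_equal = True
--             if seen_greater:
--                 return False
--         else:
--             seen_greater = True
--
--     return True
-- ===== SOURCE B (Python) =====
-- def is_valid_partition(arr, pivot):
--     codes = [0 if x < pivot else (1 if x == pivot else 2) for x in arr]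
--     return all(codes[i] <= codes[i + 1] for i in range(len(codes) - 1))
-- ===== Notes on version B (the rewrite author's own statement) =====
-- stated objective: alternative
-- what changed: Replaces the interleaved two-boolean state machine with a map-then-check decomposition: map each element to a region code 0/1/2, then verify the code list is non-decreasing.
import Mathlib
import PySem

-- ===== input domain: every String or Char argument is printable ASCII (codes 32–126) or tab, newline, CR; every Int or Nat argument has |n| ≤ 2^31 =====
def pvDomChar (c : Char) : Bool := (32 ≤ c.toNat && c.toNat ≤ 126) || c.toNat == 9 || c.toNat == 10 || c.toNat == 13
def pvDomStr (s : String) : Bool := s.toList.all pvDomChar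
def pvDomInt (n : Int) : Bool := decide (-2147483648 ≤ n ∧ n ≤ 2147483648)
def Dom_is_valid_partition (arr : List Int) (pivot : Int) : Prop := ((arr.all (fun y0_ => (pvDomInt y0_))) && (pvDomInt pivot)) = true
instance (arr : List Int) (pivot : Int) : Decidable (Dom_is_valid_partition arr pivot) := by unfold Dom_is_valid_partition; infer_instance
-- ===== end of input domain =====

-- B replaces A's interleaved two-boolean state machine by mapping each element to a
-- region code (0: <pivot, 1: ==pivot, 2: >pivot) and checking the codes are non-decreasing (objective: alternative).

-- ===== PORT A =====
-- loop over arr carrying the two booleans; `false` propagated as early return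
def pvLoopA (pivot : Int) : List Int → Bool → Bool → Bool
  | [], _, _ => true
  | x :: t, seen_equal, seen_greater =>
    if x < pivot then
      if seen_equal || seen_greater then false else pvLoopA pivot t seen_equal seen_greater
    else if x == pivot then
      if seen_greater then false else pvLoopA pivot t true seen_greater
    else
      pvLoopA pivot t seen_equal true

def is_valid_partition (arr : List Int) (pivot : Int) : Bool :=
  pvLoopA pivot arr false false

-- ===== PORT B =====
-- pairwise non-decreasing check over the code list (the `all(... for i in range(...))` pass)
def pvNonDec : List Int → Bool
  | [] => true
  | [_] => true
  | a :: b :: t => (a ≤ b : Bool) && pvNonDec (b :: t)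

def is_valid_partition_alt (arr : List Int) (pivot : Int) : Bool :=
  let codes := arr.map (fun x => if x < pivot then (0 : Int) else if x == pivot then 1 else 2)
  pvNonDec codes

-- ===== PRECONDITION & SPEC =====
def Spec_is_valid_partition (arr : List Int) (pivot : Int) (out : Bool) : Prop := out = is_valid_partition_alt arr pivot
instance (arr : List Int) (pivot : Int) (out : Bool) : Decidable (Spec_is_valid_partition arr pivot out) := by unfold Spec_is_valid_partition; infer_instance

-- ===== CLAIM (what is proved, stated in full; the proofs are below) =====
def Claim_equal_is_valid_partition : Prop := ∀ (arr : List Int) (pivot : Int), Dom_is_valid_partition arr pivot → Spec_is_valid_partition arr pivot (is_valid_partition arr pivot)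

-- ===== LEMMAS AND PROOFS =====

-- the booleans (seen_equal, seen_greater) correspond to the largest region code seen so far
def pvStateCode (se sg : Bool) : Int := if sg then 2 else if se then 1 else 0

theorem pvLoopA_eq_nonDec (pivot : Int) (arr : List Int) :
    ∀ se sg, pvLoopA pivot arr se sg =
      pvNonDec (pvStateCode se sg :: arr.map (fun x => if x < pivot then (0 : Int) else if x == pivot then 1 else 2)) := by
  induction arr with
  | nil => intro se sg; simp [pvLoopA, pvNonDec]
  | cons x t ih =>
    intro se sg
    by_cases h1 : x < pivot
    · simp only [pvLoopA, List.map, h1, if_pos, ih]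
      cases se <;> cases sg <;> simp [pvStateCode, pvNonDec]
    · by_cases h2 : x = pivot
      · simp only [pvLoopA, List.map, h2, beq_self_eq_true, if_pos, ih]
        cases se <;> cases sg <;> simp [pvStateCode, pvNonDec]
      · have hb : (x == pivot) = false := by simpa using h2
        simp only [pvLoopA, List.map, hb, Bool.false_eq_true, ih]
        cases se <;> cases sg <;> simp [pvStateCode, pvNonDec, h1]

-- prepending the initial state code 0 does not change the check: all codes are ≥ 0
theorem pvNonDec_cons_zero (pivot : Int) (arr : List Int) :
    pvNonDec ((0 : Int) :: arr.map (fun x => if x < pivot then (0 : Int) else if x == pivot then 1 else 2)) =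
    pvNonDec (arr.map (fun x => if x < pivot then (0 : Int) else if x == pivot then 1 else 2)) := by
  cases arr with
  | nil => simp [pvNonDec]
  | cons x t =>
    simp only [List.map, pvNonDec]
    split_ifs <;> simp

-- ===== VERDICT (by name: the statement is the Claim_ definition above) =====
theorem is_valid_partition_spec : Claim_equal_is_valid_partition := by
  intro arr pivot _
  unfold Spec_is_valid_partition is_valid_partition is_valid_partition_alt
  rw [pvLoopA_eq_nonDec]
  simpa [pvStateCode] using pvNonDec_cons_zero pivot arr
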